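-- pv_equiv track=rewrite | github.com/TilenBerlak/PythonProgramming | 4. Potapljanje_ladjic.py | razpostavi
-- ===== SOURCE A (Python) =====
-- def je_prostor(plosca, kje, dolzina):
--     rez = plosca[kje:kje+dolzina+1]
--
--     if len(rez) < dolzina:
--         return False
--
--     if kje != 0 and plosca[kje-1] != "":
--         return False
--
--     prostor = True
--     for i in rez:
--         if i != "":
--             prostor = False
--             return False
--     if prostor:
--         return True
--
-- def razpostavi(n, ladje):
--     plosca = []
--     i = 0
--     while i < n:
--         plosca.append("")
--         i += 1
--     for a in ladje:
--         oznaka, dolzina = a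
--         j = 0
--         while j < len(plosca):
--             if j != 0 and plosca[j - 1] == "" and plosca[j] == "":
--                 kje = j
--                 break
--             elif j == 0 and plosca[j] == "":
--                 kje = j
--                 break
--             j += 1
--
--         if je_prostor(plosca, kje, dolzina):
--             i = kje
--             while (i < kje + dolzina):
--                 plosca[i] = oznaka
--                 i += 1
--
--     return plosca
-- ===== SOURCE B (Python) =====
-- def razpostavi(n, ladje):
--     # Single left-to-right pass: the search for the next admissible start resumes
--     # where the previous one stopped, instead of rescanning the board from index 0.
--     plosca = [""] * n
--     p = 0
--     for oznaka, dolzina in ladje: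
--         while p < len(plosca) and not (plosca[p] == "" and (p == 0 or plosca[p - 1] == "")):
--             p += 1
--         if p + dolzina <= len(plosca) and all(c == "" for c in plosca[p:p + dolzina]):
--             for i in range(p, p + dolzina):
--                 plosca[i] = oznaka
--     return plosca
-- ===== Notes on version B (the rewrite author's own statement) =====
-- stated objective: faster
-- what changed: B keeps a persistent scan pointer: the search for the next admissible start resumes where the previous search stopped (the pointer is monotone), instead of A's rescan of the whole board from index 0 for every ship, and the fit test checks the d cells directly instead of A's je_prostor helper slice of d+1 cells.
import Mathlib
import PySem

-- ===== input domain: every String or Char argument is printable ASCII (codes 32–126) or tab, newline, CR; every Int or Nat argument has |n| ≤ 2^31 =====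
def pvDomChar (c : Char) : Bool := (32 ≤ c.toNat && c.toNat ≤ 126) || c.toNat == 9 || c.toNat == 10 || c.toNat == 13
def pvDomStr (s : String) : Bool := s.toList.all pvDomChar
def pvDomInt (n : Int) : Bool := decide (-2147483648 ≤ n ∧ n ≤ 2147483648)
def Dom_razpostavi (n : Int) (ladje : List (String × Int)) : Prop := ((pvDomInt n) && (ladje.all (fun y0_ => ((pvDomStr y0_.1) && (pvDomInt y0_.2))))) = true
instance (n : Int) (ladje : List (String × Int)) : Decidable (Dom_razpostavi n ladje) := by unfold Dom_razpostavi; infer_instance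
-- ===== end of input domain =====

-- B resumes the search for the next admissible start from a persistent pointer instead of
-- rescanning the board from index 0 for every ship (objective: faster); RETURN values proved equal on Pre_.

-- ===== PORT A =====

-- plosca[kje:kje+dolzina+1]; plosca[kje-1] is indexing — in range at every call site inside razpostavi
def jeProstor (plosca : List String) (kje : Int) (dolzina : Int) : Bool :=
  let rez := PySem.List.slice plosca (some kje) (some (kje + dolzina + 1))
  if (rez.length : Int) < dolzina then false
  else if kje ≠ 0 ∧ ((PySem.List.pyGet? plosca (kje - 1)).getD "") ≠ "" then false
  else rez.all (fun i => i == "")          -- the for-loop: early-return False on a nonempty cell, else True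

-- the while-loop over j searching the first free start; none = loop fell through without break
def findKje (plosca : List String) (j : Nat) : Option Nat :=
  if _h : j < plosca.length then
    if j ≠ 0 ∧ plosca.getD (j - 1) "" = "" ∧ plosca.getD j "" = "" then some j
    else if j = 0 ∧ plosca.getD j "" = "" then some j
    else findKje plosca (j + 1)
  else none
termination_by plosca.length - j

-- while i < stop: plosca[i] = oznaka; i is a valid index at every call site inside razpostavi
def setRange (plosca : List String) (i stop : Int) (oznaka : String) : List String :=
  if i < stop then setRange (plosca.set i.toNat oznaka) (i + 1) stop oznaka else plosca
termination_by (stop - i).toNat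
decreasing_by omega

-- while i < n: plosca.append("")
def buildPlosca (n : Int) (i : Int) (plosca : List String) : List String :=
  if i < n then buildPlosca n (i + 1) (plosca ++ [""]) else plosca
termination_by (n - i).toNat
decreasing_by omega

-- one iteration of the for-loop; the Option Int carries Python's variable kje across iterations
-- (none = still unbound: Python raises NameError there, which Pre_razpostavi excludes)
def stepA (st : List String × Option Int) (a : String × Int) : List String × Option Int :=
  let kje : Option Int :=
    match findKje st.1 0 with
    | some j => some (j : Int)
    | none => st.2
  match kje with
  | none => st
  | some k =>
      if jeProstor st.1 k a.2 then (setRange st.1 k (k + a.2) a.1, some k) else (st.1, k)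

def razpostavi (n : Int) (ladje : List (String × Int)) : List String :=
  (ladje.foldl stepA (buildPlosca n 0 [], (none : Option Int))).1

-- ===== PORT B =====

-- B's while-loop: advance p while plosca[p] is not an admissible start (both reads in range)
def advanceP (plosca : List String) (p : Nat) : Nat :=
  if _h : p < plosca.length then
    if ¬(plosca.getD p "" = "" ∧ (p = 0 ∨ plosca.getD (p - 1) "" = "")) then advanceP plosca (p + 1)
    else p
  else p
termination_by plosca.length - p

-- one iteration of B's for-loop over the ships; the Nat is the persistent pointer p
def stepB (st : List String × Nat) (a : String × Int) : List String × Nat :=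
  let p := advanceP st.1 st.2
  if ((p : Int) + a.2 ≤ (st.1.length : Int)) ∧
      (PySem.List.slice st.1 (some (p : Int)) (some ((p : Int) + a.2))).all (fun c => c == "") = true then
    ((PySem.List.pyRange (p : Int) ((p : Int) + a.2) 1).foldl (fun b i => b.set i.toNat a.1) st.1, p)
  else (st.1, p)

def razpostavi_alt (n : Int) (ladje : List (String × Int)) : List String :=
  (ladje.foldl stepB (List.replicate n.toNat "", 0)).1

-- ===== PRECONDITION & SPEC =====
-- Pre_ excludes exactly the inputs where A raises NameError (empty board but ships to place:
-- the search loop never runs, so kje is unbound at its first use).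
def Pre_razpostavi (n : Int) (ladje : List (String × Int)) : Prop := 0 < n ∨ ladje = []
instance (n : Int) (ladje : List (String × Int)) : Decidable (Pre_razpostavi n ladje) := by
  unfold Pre_razpostavi; infer_instance
def pvWitness_razpostavi : Int × (List (String × Int)) := (5, [("x", 2), ("y", 1)])

def Spec_razpostavi (n : Int) (ladje : List (String × Int)) (out : List String) : Prop := out = razpostavi_alt n ladje
instance (n : Int) (ladje : List (String × Int)) (out : List String) : Decidable (Spec_razpostavi n ladje out) := by unfold Spec_razpostavi; infer_instance

-- ===== CLAIM (what is proved, stated in full; the proofs are below) =====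
def Claim_equal_razpostavi : Prop := ∀ (n : Int) (ladje : List (String × Int)), Dom_razpostavi n ladje → Pre_razpostavi n ladje → Spec_razpostavi n ladje (razpostavi n ladje)

-- ===== LEMMAS AND PROOFS =====

-- the ghost abstraction both loops are simulated against: the painted prefix `cells`
-- (each placed ship's cells followed by its single gap cell)
def stepG (size : Int) (cells : List String) (a : String × Int) : List String :=
  if 0 < a.2 ∧ a.2 ≤ size - (cells.length : Int) ∧ a.1 ≠ "" then
    cells ++ List.replicate a.2.toNat a.1 ++ [""]
  else cells

-- the board determined by the painted prefix `cells` on a board of `size` cells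
def boardOf (size : Nat) (cells : List String) : List String :=
  List.take size (cells ++ List.replicate (size - cells.length) "")

-- structural invariant of the painted prefix: no admissible start inside it, it ends with
-- its gap cell, and it overhangs the board by at most one cell
def CellsInv (size : Nat) (cells : List String) : Prop :=
  (∀ j, j < cells.length → ¬ (cells.getD j "" = "" ∧ (j = 0 ∨ cells.getD (j - 1) "" = ""))) ∧
  (cells ≠ [] → cells.getD (cells.length - 1) "" = "") ∧
  cells.length ≤ size + 1

-- the invariant tying A's loop state (board, kje) to the ghost prefix `cells`
def PlaceInv (size : Nat) (cells : List String) (kjeOpt : Option Int) : Prop :=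
  CellsInv size cells ∧
  ((kjeOpt = none ∧ cells = []) ∨
   (kjeOpt = some (cells.length : Int) ∧ cells.length < size) ∨
   (∃ k : Nat, kjeOpt = some (k : Int) ∧ k + 2 ≤ cells.length ∧ cells.getD k "" ≠ ""))

theorem boardOf_length (size : Nat) (cells : List String) : (boardOf size cells).length = size := by
  simp [boardOf]; omega

theorem boardOf_eq_append (size : Nat) (cells : List String) (h : cells.length ≤ size) :
    boardOf size cells = cells ++ List.replicate (size - cells.length) "" := by
  apply List.take_of_length_le; simp; omega

theorem getD_singleton_empty (m : Nat) : ([""] : List String).getD m "" = "" := by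
  cases m with
  | zero => rfl
  | succ k => simp [List.getD]

theorem setRange_noop (plosca : List String) (i stop : Int) (s : String) (h : stop ≤ i) :
    setRange plosca i stop s = plosca := by
  unfold setRange; rw [if_neg (by omega)]

theorem replicate_getD (k m : Nat) (a : String) (h : a = "") : (List.replicate k a).getD m "" = "" := by
  subst h
  rw [List.getD_eq_getElem?_getD, List.getElem?_replicate]
  split <;> rfl

theorem boardOf_getD (size : Nat) (cells : List String) (j : Nat) :
    (boardOf size cells).getD j "" = if j < size then cells.getD j "" else "" := by
  by_cases hj : j < size
  · rw [if_pos hj]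
    unfold boardOf
    rw [List.getD_eq_getElem?_getD, List.getElem?_take_of_lt hj, ← List.getD_eq_getElem?_getD]
    by_cases hjc : j < cells.length
    · exact List.getD_append _ _ _ _ hjc
    · rw [List.getD_append_right _ _ _ _ (by omega), List.getD_eq_default cells _ (by omega)]
      exact replicate_getD _ _ _ rfl
  · rw [if_neg hj]
    exact List.getD_eq_default _ _ (by rw [boardOf_length]; omega)

theorem findKje_none (plosca : List String) (m : Nat) (hm : plosca.length ≤ m) :
    findKje plosca m = none := by
  unfold findKje; rw [dif_neg (by omega)]

theorem findKje_skip (plosca : List String) (j m : Nat) (hjm : j ≤ m)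
    (h : ∀ i, j ≤ i → i < m → ¬ (plosca.getD i "" = "" ∧ (i = 0 ∨ plosca.getD (i - 1) "" = ""))) :
    findKje plosca j = findKje plosca m := by
  obtain ⟨fuel, hf⟩ : ∃ fuel, m - j = fuel := ⟨_, rfl⟩
  induction fuel generalizing j with
  | zero =>
      have : j = m := by omega
      rw [this]
  | succ f ih =>
      have hjm' : j < m := by omega
      have hcond := h j le_rfl hjm'
      by_cases hlen : j < plosca.length
      · rw [findKje, dif_pos hlen,
          if_neg (by rintro ⟨h0, h1, h2⟩; exact hcond ⟨h2, Or.inr h1⟩),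
          if_neg (by rintro ⟨h0, h2⟩; exact hcond ⟨h2, Or.inl h0⟩)]
        exact ih (j + 1) (by omega) (fun i hi1 hi2 => h i (by omega) hi2) (by omega)
      · rw [findKje_none plosca j (by omega), findKje_none plosca m (by omega)]

theorem findKje_found (plosca : List String) (m : Nat) (hm : m < plosca.length)
    (hc : plosca.getD m "" = "" ∧ (m = 0 ∨ plosca.getD (m - 1) "" = "")) :
    findKje plosca m = some m := by
  rw [findKje, dif_pos hm]
  by_cases h0 : m = 0
  · rw [if_neg (by rintro ⟨hne, -⟩; exact hne h0), if_pos ⟨h0, hc.1⟩]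
  · rcases hc.2 with h | h
    · exact absurd h h0
    · rw [if_pos ⟨h0, h, hc.1⟩]

-- A's rescan from 0 always returns the frontier (or fails past the board's end)
theorem findKje_inv (size : Nat) (cells : List String) (hinv : CellsInv size cells) :
    findKje (boardOf size cells) 0 =
      if cells.length < size then some cells.length else none := by
  obtain ⟨hno, hlast, -⟩ := hinv
  have hb := boardOf_getD size cells
  by_cases hlt : cells.length < size
  · rw [if_pos hlt]
    rw [findKje_skip (boardOf size cells) 0 cells.length (by omega)
      (by
        intro i _ hi2
        rw [hb i, hb (i - 1), if_pos (by omega), if_pos (by omega)]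
        exact hno i hi2)]
    apply findKje_found _ _ (by rw [boardOf_length]; omega)
    constructor
    · rw [hb, if_pos hlt]
      exact List.getD_eq_default _ _ (by omega)
    · by_cases h0 : cells.length = 0
      · exact Or.inl h0
      · refine Or.inr ?_
        rw [hb, if_pos (by omega)]
        exact hlast (by intro hc; rw [hc] at h0; exact h0 rfl)
  · rw [if_neg hlt]
    rw [findKje_skip (boardOf size cells) 0 size (by omega)
      (by
        intro i _ hi2
        rw [hb i, hb (i - 1), if_pos (by omega), if_pos (by omega)]
        exact hno i (by omega))]
    exact findKje_none _ _ (by rw [boardOf_length])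

-- B's resumed scan lands on the same frontier (or on the board's end)
theorem advanceP_inv (size : Nat) (cells : List String) (p : Nat) (hinv : CellsInv size cells)
    (hp1 : p ≤ cells.length) (hp2 : p ≤ size) :
    advanceP (boardOf size cells) p = min cells.length size := by
  obtain ⟨hno, hlast, -⟩ := hinv
  have hb := boardOf_getD size cells
  have hlen := boardOf_length size cells
  obtain ⟨fuel, hf⟩ : ∃ fuel, min cells.length size - p = fuel := ⟨_, rfl⟩
  induction fuel generalizing p with
  | zero =>
      have hpm : p = min cells.length size := by omega
      subst hpm
      by_cases hlt : cells.length < size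
      · have hm : min cells.length size = cells.length := by omega
        rw [hm] at *
        rw [advanceP, dif_pos (by omega)]
        rw [if_neg ?hc]
        case hc =>
          intro hcon
          apply hcon
          constructor
          · rw [hb, if_pos hlt]
            exact List.getD_eq_default _ _ (by omega)
          · by_cases h0 : cells.length = 0
            · exact Or.inl h0
            · refine Or.inr ?_
              rw [hb, if_pos (by omega)]
              exact hlast (by intro hc; rw [hc] at h0; exact h0 rfl)
      · have hm : min cells.length size = size := by omega
        rw [hm] at *
        rw [advanceP, dif_neg (by omega)]
  | succ f ih =>
      have hplt : p < min cells.length size := by omega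
      rw [advanceP, dif_pos (by omega)]
      rw [if_pos ?hc]
      case hc =>
        rintro ⟨h1, h2⟩
        apply hno p (by omega)
        refine ⟨?_, ?_⟩
        · rw [hb, if_pos (by omega)] at h1; exact h1
        · rcases h2 with h0 | h0
          · exact Or.inl h0
          · rw [hb, if_pos (by omega)] at h0; exact Or.inr h0
      exact ih (p + 1) (by omega) (by omega) (by omega)

theorem take_rep (m k : Nat) (a : String) : (List.replicate k a).take m = List.replicate (min m k) a := by
  induction k generalizing m with
  | zero => simp
  | succ kk ih =>
      cases m with
      | zero => simp
      | succ mm =>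
          rw [List.replicate_succ, List.take_succ_cons, ih]
          have : min (mm + 1) (kk + 1) = min mm kk + 1 := by omega
          rw [this, List.replicate_succ]

theorem slice_board (size : Nat) (cells : List String) (d : Nat) (hL : cells.length ≤ size) :
    PySem.List.slice (boardOf size cells) (some (cells.length : Int))
        (some ((cells.length : Int) + (d : Int))) =
      List.replicate (min d (size - cells.length)) "" := by
  rw [PySem.List.slice_natCast_add, boardOf_eq_append _ _ hL, List.drop_left, take_rep]

theorem take_rep_pad (size : Nat) (cells : List String) (a b : Nat)
    (ha : size ≤ cells.length + a) (hb : size ≤ cells.length + b) :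
    (cells ++ List.replicate a "").take size = (cells ++ List.replicate b "").take size := by
  apply List.ext_getElem
  · simp; omega
  · intro i hi1 hi2
    simp only [List.length_take, List.length_append, List.length_replicate] at hi1 hi2
    rw [List.getElem_take, List.getElem_take]
    by_cases hc : i < cells.length
    · rw [List.getElem_append_left hc, List.getElem_append_left hc]
    · rw [List.getElem_append_right (by omega), List.getElem_append_right (by omega),
        List.getElem_replicate, List.getElem_replicate]

theorem set_board (size : Nat) (cells : List String) (s : String) (h : cells.length < size) :
    (boardOf size cells).set cells.length s = boardOf size (cells ++ [s]) := by
  rw [boardOf_eq_append _ _ (by omega), boardOf_eq_append _ _ (by simp; omega)]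
  rw [List.set_append_right _ _ (by omega)]
  have h1 : size - cells.length = (size - cells.length - 1) + 1 := by omega
  rw [h1, List.replicate_succ]
  have h2 : cells.length - cells.length = 0 := by omega
  rw [h2, List.set_cons_zero]
  have h3 : size - cells.length - 1 = size - (cells ++ [s]).length := by simp; omega
  rw [h3]
  simp

theorem setRange_board (size : Nat) (cells : List String) (d : Nat) (s : String)
    (h : cells.length + d ≤ size) :
    setRange (boardOf size cells) (cells.length : Int) ((cells.length : Int) + (d : Int)) s =
      boardOf size (cells ++ List.replicate d s) := by
  induction d generalizing cells with
  | zero => rw [setRange_noop _ _ _ _ (by omega)]; simp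
  | succ dd ih =>
      rw [setRange, if_pos (by push_cast; omega)]
      have ht : ((cells.length : Int)).toNat = cells.length := by omega
      rw [ht, set_board size cells s (by omega)]
      have := ih (cells ++ [s]) (by simp; omega)
      have harg : ((cells ++ [s]).length : Int) = (cells.length : Int) + 1 := by simp
      rw [harg] at this
      have harg2 : (cells.length : Int) + 1 + (dd : Int) = (cells.length : Int) + ((dd + 1 : Nat) : Int) := by
        push_cast; ring
      rw [harg2] at this
      rw [this, List.append_assoc]
      have hrep : [s] ++ List.replicate dd s = List.replicate (dd + 1) s := by
        rw [List.replicate_succ]; rfl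
      rw [hrep]

-- B's paint loop (a fold over range(p, p+d)) writes the same cells as A's while-loop
theorem foldl_set_eq_setRange (plosca : List String) (i stop : Int) (s : String) :
    (PySem.List.pyRange i stop 1).foldl (fun b j => b.set j.toNat s) plosca =
      setRange plosca i stop s := by
  obtain ⟨fuel, hf⟩ : ∃ fuel, (stop - i).toNat = fuel := ⟨_, rfl⟩
  induction fuel generalizing i plosca with
  | zero =>
      rw [PySem.List.pyRange_one_eq_nil (by omega), setRange_noop _ _ _ _ (by omega)]
      rfl
  | succ f ih =>
      rw [PySem.List.pyRange_one_cons (by omega), List.foldl_cons,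
        setRange, if_pos (by omega)]
      exact ih _ _ (by omega)

theorem boardOf_snoc_empty (size : Nat) (cells : List String) (h : cells.length ≤ size) :
    boardOf size (cells ++ [""]) = boardOf size cells := by
  unfold boardOf
  have e1 : (cells ++ [""]) ++ List.replicate (size - (cells ++ [""]).length) "" =
      cells ++ List.replicate (1 + (size - (cells ++ [""]).length)) "" := by
    rw [List.replicate_add, List.replicate_one, List.append_assoc]
  rw [e1]
  apply take_rep_pad <;> (try simp) <;> omega

theorem boardOf_pad (size : Nat) (cells : List String) (m : Nat) (h : cells.length + m ≤ size) :
    boardOf size (cells ++ List.replicate m "") = boardOf size cells := by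
  unfold boardOf
  have e1 : (cells ++ List.replicate m "") ++
      List.replicate (size - (cells ++ List.replicate m "").length) "" =
      cells ++ List.replicate (m + (size - (cells ++ List.replicate m "").length)) "" := by
    rw [List.replicate_add, List.append_assoc]
  rw [e1]
  apply take_rep_pad <;> (try simp) <;> omega

theorem jeProstor_fit (size : Nat) (cells : List String) (d : Nat)
    (hlast : cells ≠ [] → cells.getD (cells.length - 1) "" = "")
    (hlt : cells.length < size) (hfit : cells.length + d ≤ size) :
    jeProstor (boardOf size cells) (cells.length : Int) (d : Int) = true := by
  simp only [jeProstor]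
  have hcast : (cells.length : Int) + (d : Int) + 1 = (cells.length : Int) + ((d + 1 : Nat) : Int) := by
    push_cast; ring
  rw [hcast, slice_board size cells (d + 1) (by omega)]
  rw [if_neg (by simp only [List.length_replicate]; push_cast; omega)]
  rw [if_neg ?hc]
  case hc =>
    rintro ⟨h0, hne⟩
    apply hne
    have hl0 : 0 < cells.length := by
      by_contra hc
      exact h0 (by omega)
    have hcast2 : (cells.length : Int) - 1 = ((cells.length - 1 : Nat) : Int) := by omega
    rw [hcast2, PySem.List.pyGet?_natCast]
    have hlt1 : cells.length - 1 < (boardOf size cells).length := by rw [boardOf_length]; omega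
    rw [List.getElem?_eq_getElem hlt1]
    simp only [Option.getD_some]
    have he : (boardOf size cells)[cells.length - 1] =
        (boardOf size cells).getD (cells.length - 1) "" := (List.getD_eq_getElem _ _ hlt1).symm
    rw [he, boardOf_getD, if_pos (by omega)]
    exact hlast (by intro hc; rw [hc] at hl0; simp at hl0)
  · simp [List.all_replicate]

theorem jeProstor_nofit (size : Nat) (cells : List String) (d : Int)
    (hle : cells.length ≤ size) (hbig : (size : Int) < (cells.length : Int) + d) :
    jeProstor (boardOf size cells) (cells.length : Int) d = false := by
  obtain ⟨dn, rfl⟩ : ∃ dn : Nat, d = (dn : Int) := ⟨d.toNat, by omega⟩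
  simp only [jeProstor]
  have hcast : (cells.length : Int) + (dn : Int) + 1 = (cells.length : Int) + ((dn + 1 : Nat) : Int) := by
    push_cast; ring
  rw [hcast, slice_board size cells (dn + 1) hle]
  rw [if_pos (by simp only [List.length_replicate]; push_cast; omega)]

theorem jeProstor_occupied (size : Nat) (cells : List String) (k : Nat) (d : Int)
    (hk : k < size) (hocc : (boardOf size cells).getD k "" ≠ "") (hd : 0 ≤ d) :
    jeProstor (boardOf size cells) (k : Int) d = false := by
  obtain ⟨dn, rfl⟩ : ∃ dn : Nat, d = (dn : Int) := ⟨d.toNat, by omega⟩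
  simp only [jeProstor]
  have hk' : k < (boardOf size cells).length := by rw [boardOf_length]; omega
  have hcast : (k : Int) + (dn : Int) + 1 = (k : Int) + ((dn + 1 : Nat) : Int) := by push_cast; ring
  rw [hcast, PySem.List.slice_natCast_add]
  have hdrop : (boardOf size cells).drop k = (boardOf size cells)[k] :: (boardOf size cells).drop (k + 1) :=
    (List.getElem_cons_drop hk').symm
  rw [hdrop, List.take_succ_cons]
  have hall : ((boardOf size cells)[k] :: ((boardOf size cells).drop (k + 1)).take dn).all (fun i => i == "") = false := by
    rw [List.all_cons]
    have : ((boardOf size cells)[k] == "") = false := by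
      rw [beq_eq_false_iff_ne]
      rw [← List.getD_eq_getElem _ _ hk']
      exact hocc
    rw [this]
    rfl
  rw [hall]
  split_ifs <;> rfl

-- stepG preserves the structural invariant of the painted prefix
theorem stepG_cellsInv (size : Nat) (cells : List String) (a : String × Int)
    (hinv : CellsInv size cells) : CellsInv size (stepG (size : Int) cells a) := by
  obtain ⟨hno, hlast, hlen⟩ := hinv
  obtain ⟨s, d⟩ := a
  by_cases hc : 0 < d ∧ d ≤ (size : Int) - (cells.length : Int) ∧ s ≠ ""
  · obtain ⟨dn, rfl⟩ : ∃ dn : Nat, d = (dn : Int) := ⟨d.toNat, by omega⟩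
    have hB : stepG (size : Int) cells (s, (dn : Int)) =
        cells ++ List.replicate dn s ++ [""] := by
      simp only [stepG]
      rw [if_pos hc]
      simp
    obtain ⟨hd, hfit, hs⟩ := hc
    have hdn1 : 1 ≤ dn := by omega
    rw [hB]
    set cc : List String := cells ++ List.replicate dn s ++ [""] with hcc
    have hccd : ∀ j, cc.getD j "" =
        if j < cells.length then cells.getD j ""
        else if j < cells.length + dn then s else "" := by
      intro j
      by_cases hj1 : j < cells.length
      · rw [if_pos hj1, hcc, List.getD_append _ _ _ _ (by simp; omega),
          List.getD_append _ _ _ _ hj1]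
      · rw [if_neg hj1]
        by_cases hj2 : j < cells.length + dn
        · rw [if_pos hj2, hcc, List.getD_append _ _ _ _ (by simp; omega),
            List.getD_append_right _ _ _ _ (by omega),
            List.getD_eq_getElem _ _ (by simp; omega)]
          simp [List.getElem_replicate]
        · rw [if_neg hj2, hcc, List.getD_append_right _ _ _ _ (by simp; omega)]
          exact getD_singleton_empty _
    have hcclen : cc.length = cells.length + dn + 1 := by simp [hcc]; omega
    refine ⟨?_, ?_, ?_⟩
    · intro j hj
      rw [hcclen] at hj
      rintro ⟨hje, hjp⟩
      rw [hccd j] at hje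
      by_cases hj1 : j < cells.length
      · rw [if_pos hj1] at hje
        apply hno j hj1
        refine ⟨hje, ?_⟩
        rcases hjp with h0 | hp
        · exact Or.inl h0
        · rw [hccd (j - 1), if_pos (by omega)] at hp
          exact Or.inr hp
      · by_cases hj2 : j < cells.length + dn
        · rw [if_neg hj1, if_pos hj2] at hje
          exact hs hje
        · have hje' : j = cells.length + dn := by omega
          rcases hjp with h0 | hp
          · omega
          · rw [hccd (j - 1), if_neg (by omega), if_pos (by omega)] at hp
            exact hs hp
    · intro _
      rw [hcclen]
      simp only [Nat.add_sub_cancel]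
      rw [hccd, if_neg (by omega), if_neg (by omega)]
    · rw [hcclen]; omega
  · have hB : stepG (size : Int) cells (a := (s, d)) = cells := by
      simp only [stepG]
      rw [if_neg hc]
    rw [hB]
    exact ⟨hno, hlast, hlen⟩

theorem stepG_length_le (size : Int) (cells : List String) (a : String × Int) :
    cells.length ≤ (stepG size cells a).length := by
  simp only [stepG]
  split_ifs <;> simp

-- one step of A's loop against the ghost prefix
theorem step_sim (size : Nat) (hsize : 0 < size) (cells : List String) (kjeOpt : Option Int)
    (a : String × Int) (hinv : PlaceInv size cells kjeOpt) :
    (stepA (boardOf size cells, kjeOpt) a).1 = boardOf size (stepG (size : Int) cells a) ∧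
    PlaceInv size (stepG (size : Int) cells a) (stepA (boardOf size cells, kjeOpt) a).2 := by
  obtain ⟨⟨hno, hlast, hlen⟩, hkje⟩ := hinv
  obtain ⟨s, d⟩ := a
  have hfk := findKje_inv size cells ⟨hno, hlast, hlen⟩
  have hGinv := stepG_cellsInv size cells (s, d) ⟨hno, hlast, hlen⟩
  by_cases hlt : cells.length < size
  · rw [if_pos hlt] at hfk
    by_cases hd : 0 < d
    · by_cases hfit : d ≤ (size : Int) - (cells.length : Int)
      · obtain ⟨dn, rfl⟩ : ∃ dn : Nat, d = (dn : Int) := ⟨d.toNat, by omega⟩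
        have hfitn : cells.length + dn ≤ size := by omega
        have hjp := jeProstor_fit size cells dn hlast hlt hfitn
        simp only [stepA, hfk, hjp, if_true]
        have hset := setRange_board size cells dn s hfitn
        by_cases hs : s = ""
        · subst hs
          have hB : stepG (size : Int) cells ("", (dn : Int)) = cells := by
            simp only [stepG]
            rw [if_neg (fun hcon => hcon.2.2 rfl)]
          rw [hB]
          refine ⟨?_, ⟨hno, hlast, hlen⟩, Or.inr (Or.inl ⟨rfl, hlt⟩)⟩
          rw [hset, boardOf_pad size cells dn hfitn]
        · have hB : stepG (size : Int) cells (s, (dn : Int)) =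
              cells ++ List.replicate dn s ++ [""] := by
            simp only [stepG]
            rw [if_pos ⟨by omega, by omega, hs⟩]
            simp
          rw [hB] at hGinv ⊢
          refine ⟨?_, hGinv, ?_⟩
          · rw [hset]
            exact (boardOf_snoc_empty size (cells ++ List.replicate dn s) (by simp; omega)).symm
          · refine Or.inr (Or.inr ⟨cells.length, rfl, by simp; omega, ?_⟩)
            rw [List.getD_append _ _ _ _ (by simp; omega),
              List.getD_append_right _ _ _ _ (by omega),
              List.getD_eq_getElem _ _ (by simp; omega)]
            simpa [List.getElem_replicate] using hs
      · have hjp := jeProstor_nofit size cells d (by omega) (by omega)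
        simp only [stepA, hfk, hjp]
        have hB : stepG (size : Int) cells (s, d) = cells := by
          simp only [stepG]
          rw [if_neg (by rintro ⟨-, h2, -⟩; omega)]
        rw [hB]
        exact ⟨rfl, ⟨hno, hlast, hlen⟩, Or.inr (Or.inl ⟨rfl, hlt⟩)⟩
    · have hB : stepG (size : Int) cells (s, d) = cells := by
        simp only [stepG]
        rw [if_neg (by rintro ⟨h1, -, -⟩; omega)]
      rw [hB]
      by_cases hjp : jeProstor (boardOf size cells) (cells.length : Int) d = true
      · simp only [stepA, hfk, hjp, if_true]
        rw [setRange_noop _ _ _ _ (by omega)]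
        exact ⟨rfl, ⟨hno, hlast, hlen⟩, Or.inr (Or.inl ⟨rfl, hlt⟩)⟩
      · simp only [stepA, hfk, hjp]
        exact ⟨rfl, ⟨hno, hlast, hlen⟩, Or.inr (Or.inl ⟨rfl, hlt⟩)⟩
  · rw [if_neg hlt] at hfk
    have hB : stepG (size : Int) cells (s, d) = cells := by
      simp only [stepG]
      rw [if_neg (by rintro ⟨h1, h2, -⟩; omega)]
    rw [hB]
    rcases hkje with ⟨hnone, hcells⟩ | ⟨heq, hlt2⟩ | ⟨k, hk, hk2, hkocc⟩
    · exfalso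
      rw [hcells] at hlt
      simp at hlt
      omega
    · omega
    · have hkr : k < size := by omega
      have hocc : (boardOf size cells).getD k "" ≠ "" := by
        rw [boardOf_getD, if_pos hkr]; exact hkocc
      subst hk
      by_cases hd0 : 0 ≤ d
      · have hjp := jeProstor_occupied size cells k d hkr hocc hd0
        simp only [stepA, hfk, hjp]
        exact ⟨rfl, ⟨hno, hlast, hlen⟩, Or.inr (Or.inr ⟨k, rfl, hk2, hkocc⟩)⟩
      · by_cases hjp : jeProstor (boardOf size cells) (k : Int) d = true
        · simp only [stepA, hfk, hjp, if_true]
          rw [setRange_noop _ _ _ _ (by omega)]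
          exact ⟨rfl, ⟨hno, hlast, hlen⟩, Or.inr (Or.inr ⟨k, rfl, hk2, hkocc⟩)⟩
        · simp only [stepA, hfk, hjp]
          exact ⟨rfl, ⟨hno, hlast, hlen⟩, Or.inr (Or.inr ⟨k, rfl, hk2, hkocc⟩)⟩

-- one step of B's loop against the ghost prefix
theorem step_simB (size : Nat) (cells : List String) (p : Nat)
    (a : String × Int) (hinv : CellsInv size cells) (hp1 : p ≤ cells.length) (hp2 : p ≤ size) :
    (stepB (boardOf size cells, p) a).1 = boardOf size (stepG (size : Int) cells a) ∧
    (stepB (boardOf size cells, p) a).2 ≤ (stepG (size : Int) cells a).length ∧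
    (stepB (boardOf size cells, p) a).2 ≤ size := by
  obtain ⟨hno, hlast, hlen⟩ := hinv
  obtain ⟨s, d⟩ := a
  have hadv := advanceP_inv size cells p ⟨hno, hlast, hlen⟩ hp1 hp2
  have hblen : ((boardOf size cells).length : Int) = (size : Int) := by
    rw [boardOf_length]
  have hGlen := stepG_length_le (size : Int) cells (s, d)
  by_cases hlt : cells.length < size
  · have hm : min cells.length size = cells.length := by omega
    rw [hm] at hadv
    by_cases hd : 0 < d
    · by_cases hfit : d ≤ (size : Int) - (cells.length : Int)
      · obtain ⟨dn, rfl⟩ : ∃ dn : Nat, d = (dn : Int) := ⟨d.toNat, by omega⟩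
        have hfitn : cells.length + dn ≤ size := by omega
        have hall : (PySem.List.slice (boardOf size cells) (some (cells.length : Int))
            (some ((cells.length : Int) + (dn : Int)))).all (fun c => c == "") = true := by
          rw [slice_board size cells dn (by omega)]
          simp [List.all_replicate]
        simp only [stepB, hadv]
        rw [if_pos ⟨by rw [hblen]; omega, hall⟩]
        simp only
        rw [foldl_set_eq_setRange, setRange_board size cells dn s hfitn]
        by_cases hs : s = ""
        · subst hs
          have hB : stepG (size : Int) cells ("", (dn : Int)) = cells := by
            simp only [stepG]
            rw [if_neg (fun hcon => hcon.2.2 rfl)]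
          rw [hB]
          exact ⟨boardOf_pad size cells dn hfitn, by omega, by omega⟩
        · have hB : stepG (size : Int) cells (s, (dn : Int)) =
              cells ++ List.replicate dn s ++ [""] := by
            simp only [stepG]
            rw [if_pos ⟨by omega, by omega, hs⟩]
            simp
          rw [hB]
          refine ⟨(boardOf_snoc_empty size (cells ++ List.replicate dn s) (by simp; omega)).symm,
            by simp, by omega⟩
      · have hB : stepG (size : Int) cells (s, d) = cells := by
          simp only [stepG]
          rw [if_neg (by rintro ⟨-, h2, -⟩; omega)]
        rw [hB]
        simp only [stepB, hadv]
        rw [if_neg (by rintro ⟨h1, -⟩; rw [hblen] at h1; omega)]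
        exact ⟨rfl, by omega, by omega⟩
    · -- d ≤ 0: whichever branch B takes, the painted range is empty and the board unchanged
      have hB : stepG (size : Int) cells (s, d) = cells := by
        simp only [stepG]
        rw [if_neg (by rintro ⟨h1, -, -⟩; omega)]
      rw [hB]
      simp only [stepB, hadv]
      split_ifs with hcond
      · simp only
        rw [PySem.List.pyRange_one_eq_nil (by omega), List.foldl_nil]
        exact ⟨rfl, by omega, by omega⟩
      · exact ⟨rfl, by omega, by omega⟩
  · have hm : min cells.length size = size := by omega
    rw [hm] at hadv
    have hB : stepG (size : Int) cells (s, d) = cells := by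
      simp only [stepG]
      rw [if_neg (by rintro ⟨h1, h2, -⟩; omega)]
    rw [hB]
    simp only [stepB, hadv]
    split_ifs with hcond
    · obtain ⟨h1, -⟩ := hcond
      rw [hblen] at h1
      simp only
      rw [PySem.List.pyRange_one_eq_nil (by omega), List.foldl_nil]
      exact ⟨rfl, by omega, by omega⟩
    · exact ⟨rfl, by omega, by omega⟩

theorem loop_sim (size : Nat) (hsize : 0 < size) (ladje : List (String × Int))
    (cells : List String) (kjeOpt : Option Int) (hinv : PlaceInv size cells kjeOpt) :
    (ladje.foldl stepA (boardOf size cells, kjeOpt)).1 =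
      boardOf size (ladje.foldl (stepG (size : Int)) cells) := by
  induction ladje generalizing cells kjeOpt with
  | nil => simp
  | cons a tl ih =>
      obtain ⟨h1, h2⟩ := step_sim size hsize cells kjeOpt a hinv
      simp only [List.foldl_cons]
      have hpair : stepA (boardOf size cells, kjeOpt) a =
          (boardOf size (stepG (size : Int) cells a), (stepA (boardOf size cells, kjeOpt) a).2) :=
        Prod.ext h1 rfl
      rw [hpair]
      exact ih _ _ h2

theorem loop_simB (size : Nat) (ladje : List (String × Int))
    (cells : List String) (p : Nat) (hinv : CellsInv size cells)
    (hp1 : p ≤ cells.length) (hp2 : p ≤ size) :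
    (ladje.foldl stepB (boardOf size cells, p)).1 =
      boardOf size (ladje.foldl (stepG (size : Int)) cells) := by
  induction ladje generalizing cells p with
  | nil => simp
  | cons a tl ih =>
      obtain ⟨h1, h2, h3⟩ := step_simB size cells p a hinv hp1 hp2
      simp only [List.foldl_cons]
      have hpair : stepB (boardOf size cells, p) a =
          (boardOf size (stepG (size : Int) cells a), (stepB (boardOf size cells, p) a).2) :=
        Prod.ext h1 rfl
      rw [hpair]
      exact ih _ _ (stepG_cellsInv size cells a hinv) h2 h3

theorem buildPlosca_eq (n i : Int) (acc : List String) :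
    buildPlosca n i acc = acc ++ List.replicate (n - i).toNat "" := by
  obtain ⟨fuel, hf⟩ : ∃ fuel, (n - i).toNat = fuel := ⟨_, rfl⟩
  induction fuel generalizing i acc with
  | zero =>
      rw [buildPlosca, if_neg (by omega), hf]
      simp
  | succ f ih =>
      rw [buildPlosca, if_pos (by omega)]
      rw [ih (i + 1) (acc ++ [""]) (by omega)]
      rw [List.append_assoc]
      congr 1
      have : (n - i).toNat = (n - (i + 1)).toNat + 1 := by omega
      rw [hf] at this
      rw [show (n - (i + 1)).toNat = f by omega, hf]
      rw [show f + 1 = 1 + f by omega, List.replicate_add]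
      rfl

theorem boardOf_nil (size : Nat) : boardOf size [] = List.replicate size "" := by
  unfold boardOf
  simp

theorem cellsInv_nil (size : Nat) : CellsInv size [] := by
  refine ⟨?_, ?_, by simp⟩
  · intro j hj; simp at hj
  · intro h; exact absurd rfl h

-- ===== VERDICT (by name: the statement is the Claim_ definition above) =====
theorem razpostavi_spec : Claim_equal_razpostavi := by
  unfold Claim_equal_razpostavi
  intro n ladje _hdom hpre
  unfold Spec_razpostavi
  by_cases hpos : 0 < n
  · have hsize : 0 < n.toNat := by omega
    have hcast : ((n.toNat : Int)) = n := Int.toNat_of_nonneg (by omega)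
    simp only [razpostavi, razpostavi_alt]
    have hinit : buildPlosca n 0 [] = boardOf n.toNat [] := by
      rw [buildPlosca_eq, boardOf_nil]
      simp
    have hinitB : List.replicate n.toNat "" = boardOf n.toNat [] := (boardOf_nil n.toNat).symm
    rw [hinit, hinitB]
    have hA := loop_sim n.toNat hsize ladje [] none ⟨cellsInv_nil n.toNat, Or.inl ⟨rfl, rfl⟩⟩
    have hB := loop_simB n.toNat ladje [] 0 (cellsInv_nil n.toNat) (by simp) (by omega)
    rw [hcast] at hA hB
    rw [hA, hB]
  · rcases hpre with h | h
    · exact absurd h hpos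
    · subst h
      simp only [razpostavi, razpostavi_alt, List.foldl_nil]
      rw [buildPlosca_eq]
      have h0 : ((n : Int) - 0).toNat = 0 := by omega
      have h1 : n.toNat = 0 := by omega
      rw [h0, h1]
      simp
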